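-- pv_equiv track=rewrite | github.com/leanprover-community/mathlib4 | scripts/demote_docstring_headers.py | iter_docstrings
-- ===== SOURCE A (Python) =====
-- from typing import Iterable, List, Sequence, Tuple
--
-- def iter_docstrings(text: str) -> Iterable[Tuple[int, int]]:
--     """Yield (start, end) byte offsets for each `/-! ... -/` docstring, handling nesting."""
--     stack: List[Tuple[bool, int]] = []
--     i = 0
--     length = len(text)
--     while i < length - 1:
--         tri = text[i : i + 3]
--         if tri.startswith("/-!"):
--             stack.append((True, i))
--             i += 3
--             continue
--         bi = tri[:2]
--         if bi == "/-":
--             stack.append((False, i))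
--             i += 2
--             continue
--         if bi == "-/":
--             if stack:
--                 is_doc, start = stack.pop()
--                 if is_doc:
--                     yield (start, i + 2)
--             i += 2
--             continue
--         i += 1
-- ===== SOURCE B (Python) =====
-- def iter_docstrings(text):
--     """Yield (start, end) offsets of each `/-! ... -/` docstring via a
--     recursive-descent parse of the nested comment structure (recursion on the
--     nesting instead of an explicit stack)."""
--     n = len(text)
--
--     def comment(i, is_doc, start):
--         # Parse the body of a comment opened at `start`; return the index just
--         # past its closing `-/` (or n if it never closes), yielding docstrings.
--         while i < n - 1:
--             if text.startswith('/-!', i):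
--                 i = yield from comment(i + 3, True, i)
--             elif text.startswith('/-', i):
--                 i = yield from comment(i + 2, False, i)
--             elif text.startswith('-/', i):
--                 if is_doc:
--                     yield (start, i + 2)
--                 return i + 2
--             else:
--                 i += 1
--         return n
--
--     i = 0
--     while i < n - 1:
--         if text.startswith('/-!', i):
--             i = yield from comment(i + 3, True, i)
--         elif text.startswith('/-', i):
--             i = yield from comment(i + 2, False, i)
--         elif text.startswith('-/', i):
--             i += 2
--         else:
--             i += 1
-- ===== Notes on version B (the rewrite author's own statement) =====
-- stated objective: alternative
-- what changed: A's single flat scan driving an explicit stack of open-comment frames is replaced by a recursive-descent parser: a recursive generator parses each comment's body (recursing on the nesting structure and returning the index past its closing '-/'), so the stack disappears into the call structure.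
import Mathlib
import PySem

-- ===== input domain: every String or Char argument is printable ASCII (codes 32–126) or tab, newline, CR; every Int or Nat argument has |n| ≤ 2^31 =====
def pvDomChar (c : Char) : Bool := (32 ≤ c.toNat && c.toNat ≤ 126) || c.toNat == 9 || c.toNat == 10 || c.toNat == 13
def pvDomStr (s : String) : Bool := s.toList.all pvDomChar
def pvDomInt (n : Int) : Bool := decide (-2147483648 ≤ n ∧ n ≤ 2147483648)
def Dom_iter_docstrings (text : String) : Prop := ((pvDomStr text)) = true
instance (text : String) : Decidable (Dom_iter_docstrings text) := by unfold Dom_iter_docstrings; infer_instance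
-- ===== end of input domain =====

-- B replaces A's explicit-stack scanning loop by a recursive-descent parser
-- that recurses on the nesting structure of the comments (objective: alternative).

-- ===== PORT A =====
-- Transliteration of A's while-loop.  text[i:i+3] with 0 ≤ i is (drop i).take 3
-- (exact for nonnegative slice bounds), tri[:2] is .take 2, tri.startswith is
-- PySem.Chars.startswith, and the generator's yields are collected in acc.
def iterDocsLoopA (cs : List Char) (length : Nat) (stack : List (Bool × Nat))
    (i : Nat) (acc : List (Int × Int)) : List (Int × Int) :=
  if _h : i < length - 1 then
    if PySem.Chars.startswith ((cs.drop i).take 3) ['/', '-', '!'] then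
      iterDocsLoopA cs length ((true, i) :: stack) (i + 3) acc
    else if ((cs.drop i).take 3).take 2 = ['/', '-'] then
      iterDocsLoopA cs length ((false, i) :: stack) (i + 2) acc
    else if ((cs.drop i).take 3).take 2 = ['-', '/'] then
      match stack with
      | [] => iterDocsLoopA cs length [] (i + 2) acc
      | (isDoc, start) :: rest =>
          iterDocsLoopA cs length rest (i + 2)
            (if isDoc then acc ++ [((start : Int), (i : Int) + 2)] else acc)
    else
      iterDocsLoopA cs length stack (i + 1) acc
  else acc
termination_by length - i
decreasing_by all_goals omega

def iter_docstrings (text : String) : List (Int × Int) :=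
  iterDocsLoopA text.toList text.toList.length [] 0 []

-- ===== PORT B =====
-- Port of Source B's inner generator `comment(i, is_doc, start)`: it returns the
-- index just past the comment's closing '-/' (or n when it never closes), with
-- its yields as the list component.  The extra fuel parameter only makes the
-- recursion structural for Lean; iter_docstrings_alt passes n + 2, which the
-- equivalence proof shows is never exhausted.  text.startswith(tok, i) is
-- (cs.drop i).take |tok| = tok, exact since i is nonnegative.
def commentBF (cs : List Char) : Nat → Nat → Bool → Nat → List (Int × Int) × Nat
  | 0, _, _, _ => ([], cs.length)
  | fuel + 1, i, isDoc, start =>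
    if i < cs.length - 1 then
      if (cs.drop i).take 3 = ['/', '-', '!'] then
        ((commentBF cs fuel (i + 3) true i).1
            ++ (commentBF cs fuel (commentBF cs fuel (i + 3) true i).2 isDoc start).1,
          (commentBF cs fuel (commentBF cs fuel (i + 3) true i).2 isDoc start).2)
      else if (cs.drop i).take 2 = ['/', '-'] then
        ((commentBF cs fuel (i + 2) false i).1
            ++ (commentBF cs fuel (commentBF cs fuel (i + 2) false i).2 isDoc start).1,
          (commentBF cs fuel (commentBF cs fuel (i + 2) false i).2 isDoc start).2)
      else if (cs.drop i).take 2 = ['-', '/'] then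
        ((if isDoc then [((start : Int), (i : Int) + 2)] else []), i + 2)
      else
        commentBF cs fuel (i + 1) isDoc start
    else ([], cs.length)

-- Port of Source B's top-level while-loop.
def topBF (cs : List Char) : Nat → Nat → List (Int × Int)
  | 0, _ => []
  | fuel + 1, i =>
    if i < cs.length - 1 then
      if (cs.drop i).take 3 = ['/', '-', '!'] then
        (commentBF cs fuel (i + 3) true i).1
          ++ topBF cs fuel (commentBF cs fuel (i + 3) true i).2
      else if (cs.drop i).take 2 = ['/', '-'] then
        (commentBF cs fuel (i + 2) false i).1
          ++ topBF cs fuel (commentBF cs fuel (i + 2) false i).2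
      else if (cs.drop i).take 2 = ['-', '/'] then
        topBF cs fuel (i + 2)
      else
        topBF cs fuel (i + 1)
    else []

def iter_docstrings_alt (text : String) : List (Int × Int) :=
  topBF text.toList (text.toList.length + 2) 0

-- ===== PRECONDITION & SPEC =====
def Spec_iter_docstrings (text : String) (out : List (Int × Int)) : Prop := out = iter_docstrings_alt text
instance (text : String) (out : List (Int × Int)) : Decidable (Spec_iter_docstrings text out) := by unfold Spec_iter_docstrings; infer_instance

-- ===== CLAIM (what is proved, stated in full; the proofs are below) =====
def Claim_equal_iter_docstrings : Prop := ∀ (text : String), Dom_iter_docstrings text → Spec_iter_docstrings text (iter_docstrings text)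

-- ===== LEMMAS AND PROOFS =====

-- Main invariant, by induction on the fuel: whenever fuel ≥ n + 2 - i,
-- (L) commentBF terminates past i (or at n), never past n, and running A's
--     loop with a frame (isDoc,start) on top of the stack first produces
--     exactly the yields of B's comment(i, isDoc, start) and then continues
--     after its closing '-/' with the rest of the stack, and
-- (T) with an empty stack A's loop from i produces exactly topBF's output.
-- A's loop returns its accumulator once fewer than two characters remain.
theorem loopA_stop (cs : List Char) (stack : List (Bool × Nat)) (j : Nat)
    (acc : List (Int × Int)) (hj : ¬ j < cs.length - 1) :
    iterDocsLoopA cs cs.length stack j acc = acc := by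
  rw [iterDocsLoopA.eq_def, dif_neg hj]

theorem loopA_splits (cs : List Char) :
    ∀ fuel : Nat,
      (∀ i (isDoc : Bool) (start : Nat), cs.length + 2 - i ≤ fuel →
        (i < (commentBF cs fuel i isDoc start).2 ∨ (commentBF cs fuel i isDoc start).2 = cs.length)
        ∧ (commentBF cs fuel i isDoc start).2 ≤ cs.length
        ∧ ∀ stack acc,
            iterDocsLoopA cs cs.length ((isDoc, start) :: stack) i acc
              = iterDocsLoopA cs cs.length stack (commentBF cs fuel i isDoc start).2
                  (acc ++ (commentBF cs fuel i isDoc start).1)) ∧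
      (∀ i acc, cs.length + 2 - i ≤ fuel →
        iterDocsLoopA cs cs.length [] i acc = acc ++ topBF cs fuel i) := by
  intro fuel
  induction fuel with
  | zero =>
    constructor
    · intro i isDoc start hf
      have hni : ¬ i < cs.length - 1 := by omega
      refine ⟨Or.inr rfl, le_refl _, ?_⟩
      intro stack acc
      rw [loopA_stop cs _ i acc hni]
      simp only [commentBF, List.append_nil]
      rw [loopA_stop cs stack cs.length acc (by omega)]
    · intro i acc hf
      rw [loopA_stop cs [] i acc (by omega)]
      simp [topBF]
  | succ fuel ih =>
    obtain ⟨ihL, ihT⟩ := ih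
    constructor
    · -- (L) at fuel + 1
      intro i isDoc start hf
      by_cases h : i < cs.length - 1
      · have hdl : 2 ≤ (cs.drop i).length := by simp; omega
        rcases hshape : cs.drop i with _ | ⟨a, _ | ⟨b, t⟩⟩
        · rw [hshape] at hdl; simp at hdl
        · rw [hshape] at hdl; simp at hdl
        by_cases hab : a = '/' ∧ b = '-'
        · obtain ⟨ha, hb⟩ := hab; subst ha; subst hb
          by_cases hbang : (cs.drop i).take 3 = ['/', '-', '!']
          · -- "/-!": a docstring opener
            have hp1A : PySem.Chars.startswith ((cs.drop i).take 3) ['/', '-', '!'] := by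
              rw [hbang]; simp [PySem.Chars.startswith, List.isPrefixOf]
            obtain ⟨hj1, hj1le, heq1⟩ := ihL (i + 3) true i (by omega)
            obtain ⟨hj2, hj2le, heq2⟩ :=
              ihL (commentBF cs fuel (i + 3) true i).2 isDoc start (by omega)
            have hcb : commentBF cs (fuel + 1) i isDoc start
                = ((commentBF cs fuel (i + 3) true i).1
                    ++ (commentBF cs fuel (commentBF cs fuel (i + 3) true i).2 isDoc start).1,
                  (commentBF cs fuel (commentBF cs fuel (i + 3) true i).2 isDoc start).2) := by
              simp only [commentBF]; rw [if_pos h, if_pos hbang]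
            refine ⟨?_, ?_, ?_⟩
            · rw [hcb]; omega
            · rw [hcb]; omega
            · intro stack acc
              rw [iterDocsLoopA.eq_def, dif_pos h, if_pos hp1A]
              rw [heq1 ((isDoc, start) :: stack) acc]
              rw [heq2 stack (acc ++ (commentBF cs fuel (i + 3) true i).1)]
              rw [hcb]
              simp [List.append_assoc]
          · -- "/-": a plain comment opener
            have hp2B : (cs.drop i).take 2 = ['/', '-'] := by rw [hshape]; simp
            have hp2A : ((cs.drop i).take 3).take 2 = ['/', '-'] := by rw [hshape]; simp
            have hn1A : ¬ PySem.Chars.startswith ((cs.drop i).take 3) ['/', '-', '!'] := by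
              intro hpre
              apply hbang
              rw [hshape] at hpre ⊢
              rcases t with _ | ⟨c, t'⟩
              · simp [PySem.Chars.startswith, List.isPrefixOf] at hpre
              · simp [PySem.Chars.startswith, List.isPrefixOf] at hpre
                simp [hpre.symm]
            obtain ⟨hj1, hj1le, heq1⟩ := ihL (i + 2) false i (by omega)
            obtain ⟨hj2, hj2le, heq2⟩ :=
              ihL (commentBF cs fuel (i + 2) false i).2 isDoc start (by omega)
            have hcb : commentBF cs (fuel + 1) i isDoc start
                = ((commentBF cs fuel (i + 2) false i).1
                    ++ (commentBF cs fuel (commentBF cs fuel (i + 2) false i).2 isDoc start).1,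
                  (commentBF cs fuel (commentBF cs fuel (i + 2) false i).2 isDoc start).2) := by
              simp only [commentBF]; rw [if_pos h, if_neg hbang, if_pos hp2B]
            refine ⟨?_, ?_, ?_⟩
            · rw [hcb]; omega
            · rw [hcb]; omega
            · intro stack acc
              rw [iterDocsLoopA.eq_def, dif_pos h, if_neg hn1A, if_pos hp2A]
              rw [heq1 ((isDoc, start) :: stack) acc]
              rw [heq2 stack (acc ++ (commentBF cs fuel (i + 2) false i).1)]
              rw [hcb]
              simp [List.append_assoc]
        · by_cases hab2 : a = '-' ∧ b = '/'
          · -- "-/": a closer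
            obtain ⟨ha, hb⟩ := hab2; subst ha; subst hb
            have hn1B : ¬ (cs.drop i).take 3 = ['/', '-', '!'] := by rw [hshape]; simp
            have hn1A : ¬ PySem.Chars.startswith ((cs.drop i).take 3) ['/', '-', '!'] := by
              rw [hshape]; simp [PySem.Chars.startswith, List.isPrefixOf]
            have hn2B : ¬ (cs.drop i).take 2 = ['/', '-'] := by rw [hshape]; simp
            have hn2A : ¬ ((cs.drop i).take 3).take 2 = ['/', '-'] := by rw [hshape]; simp
            have hp3B : (cs.drop i).take 2 = ['-', '/'] := by rw [hshape]; simp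
            have hp3A : ((cs.drop i).take 3).take 2 = ['-', '/'] := by rw [hshape]; simp
            have hcb : commentBF cs (fuel + 1) i isDoc start
                = ((if isDoc then [((start : Int), (i : Int) + 2)] else []), i + 2) := by
              simp only [commentBF]; rw [if_pos h, if_neg hn1B, if_neg hn2B, if_pos hp3B]
            refine ⟨?_, ?_, ?_⟩
            · rw [hcb]; omega
            · rw [hcb]; omega
            · intro stack acc
              rw [iterDocsLoopA.eq_def, dif_pos h, if_neg hn1A, if_neg hn2A, if_pos hp3A, hcb]
              cases isDoc <;> simp
          · -- no delimiter starts here: advance one character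
            have hn1B : ¬ (cs.drop i).take 3 = ['/', '-', '!'] := by
              rw [hshape]; simp; intro h1 h2 h3; exact hab ⟨h1, h2⟩
            have hn1A : ¬ PySem.Chars.startswith ((cs.drop i).take 3) ['/', '-', '!'] := by
              rw [hshape]; simp [PySem.Chars.startswith, List.isPrefixOf]
              intro h1 h2 h3; exact hab ⟨h1.symm, h2.symm⟩
            have hn2B : ¬ (cs.drop i).take 2 = ['/', '-'] := by
              rw [hshape]; simp; intro h1 h2; exact hab ⟨h1, h2⟩
            have hn2A : ¬ ((cs.drop i).take 3).take 2 = ['/', '-'] := by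
              rw [hshape]; simp; intro h1 h2; exact hab ⟨h1, h2⟩
            have hn3B : ¬ (cs.drop i).take 2 = ['-', '/'] := by
              rw [hshape]; simp; intro h1 h2; exact hab2 ⟨h1, h2⟩
            have hn3A : ¬ ((cs.drop i).take 3).take 2 = ['-', '/'] := by
              rw [hshape]; simp; intro h1 h2; exact hab2 ⟨h1, h2⟩
            obtain ⟨hj, hjle, heq⟩ := ihL (i + 1) isDoc start (by omega)
            have hcb : commentBF cs (fuel + 1) i isDoc start
                = commentBF cs fuel (i + 1) isDoc start := by
              simp only [commentBF]; rw [if_pos h, if_neg hn1B, if_neg hn2B, if_neg hn3B]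
            refine ⟨by rw [hcb]; omega, by rw [hcb]; omega, ?_⟩
            intro stack acc
            rw [iterDocsLoopA.eq_def, dif_pos h, if_neg hn1A, if_neg hn2A, if_neg hn3A,
                heq stack acc, hcb]
      · -- fewer than two characters remain
        have hcb : commentBF cs (fuel + 1) i isDoc start = ([], cs.length) := by
          simp only [commentBF]; rw [if_neg h]
        refine ⟨Or.inr (by rw [hcb]), by rw [hcb], ?_⟩
        intro stack acc
        rw [loopA_stop cs _ i acc h, hcb]
        simp only [List.append_nil]
        rw [loopA_stop cs stack cs.length acc (by omega)]
    · -- (T) at fuel + 1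
      intro i acc hf
      by_cases h : i < cs.length - 1
      · have hdl : 2 ≤ (cs.drop i).length := by simp; omega
        rcases hshape : cs.drop i with _ | ⟨a, _ | ⟨b, t⟩⟩
        · rw [hshape] at hdl; simp at hdl
        · rw [hshape] at hdl; simp at hdl
        by_cases hab : a = '/' ∧ b = '-'
        · obtain ⟨ha, hb⟩ := hab; subst ha; subst hb
          by_cases hbang : (cs.drop i).take 3 = ['/', '-', '!']
          · -- "/-!"
            have hp1A : PySem.Chars.startswith ((cs.drop i).take 3) ['/', '-', '!'] := by
              rw [hbang]; simp [PySem.Chars.startswith, List.isPrefixOf]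
            obtain ⟨hj1, hj1le, heq1⟩ := ihL (i + 3) true i (by omega)
            have htop : topBF cs (fuel + 1) i
                = (commentBF cs fuel (i + 3) true i).1
                    ++ topBF cs fuel (commentBF cs fuel (i + 3) true i).2 := by
              simp only [topBF]; rw [if_pos h, if_pos hbang]
            rw [iterDocsLoopA.eq_def, dif_pos h, if_pos hp1A]
            rw [heq1 [] acc]
            rw [ihT (commentBF cs fuel (i + 3) true i).2
                  (acc ++ (commentBF cs fuel (i + 3) true i).1) (by omega), htop]
            simp [List.append_assoc]
          · -- "/-"
            have hp2B : (cs.drop i).take 2 = ['/', '-'] := by rw [hshape]; simp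
            have hp2A : ((cs.drop i).take 3).take 2 = ['/', '-'] := by rw [hshape]; simp
            have hn1A : ¬ PySem.Chars.startswith ((cs.drop i).take 3) ['/', '-', '!'] := by
              intro hpre
              apply hbang
              rw [hshape] at hpre ⊢
              rcases t with _ | ⟨c, t'⟩
              · simp [PySem.Chars.startswith, List.isPrefixOf] at hpre
              · simp [PySem.Chars.startswith, List.isPrefixOf] at hpre
                simp [hpre.symm]
            obtain ⟨hj1, hj1le, heq1⟩ := ihL (i + 2) false i (by omega)
            have htop : topBF cs (fuel + 1) i
                = (commentBF cs fuel (i + 2) false i).1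
                    ++ topBF cs fuel (commentBF cs fuel (i + 2) false i).2 := by
              simp only [topBF]; rw [if_pos h, if_neg hbang, if_pos hp2B]
            rw [iterDocsLoopA.eq_def, dif_pos h, if_neg hn1A, if_pos hp2A]
            rw [heq1 [] acc]
            rw [ihT (commentBF cs fuel (i + 2) false i).2
                  (acc ++ (commentBF cs fuel (i + 2) false i).1) (by omega), htop]
            simp [List.append_assoc]
        · by_cases hab2 : a = '-' ∧ b = '/'
          · -- "-/" with an empty stack: skipped
            obtain ⟨ha, hb⟩ := hab2; subst ha; subst hb
            have hn1B : ¬ (cs.drop i).take 3 = ['/', '-', '!'] := by rw [hshape]; simp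
            have hn1A : ¬ PySem.Chars.startswith ((cs.drop i).take 3) ['/', '-', '!'] := by
              rw [hshape]; simp [PySem.Chars.startswith, List.isPrefixOf]
            have hn2B : ¬ (cs.drop i).take 2 = ['/', '-'] := by rw [hshape]; simp
            have hn2A : ¬ ((cs.drop i).take 3).take 2 = ['/', '-'] := by rw [hshape]; simp
            have hp3B : (cs.drop i).take 2 = ['-', '/'] := by rw [hshape]; simp
            have hp3A : ((cs.drop i).take 3).take 2 = ['-', '/'] := by rw [hshape]; simp
            have htop : topBF cs (fuel + 1) i = topBF cs fuel (i + 2) := by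
              simp only [topBF]; rw [if_pos h, if_neg hn1B, if_neg hn2B, if_pos hp3B]
            rw [iterDocsLoopA.eq_def, dif_pos h, if_neg hn1A, if_neg hn2A, if_pos hp3A]
            simp only
            rw [ihT (i + 2) acc (by omega), htop]
          · -- advance one character
            have hn1B : ¬ (cs.drop i).take 3 = ['/', '-', '!'] := by
              rw [hshape]; simp; intro h1 h2 h3; exact hab ⟨h1, h2⟩
            have hn1A : ¬ PySem.Chars.startswith ((cs.drop i).take 3) ['/', '-', '!'] := by
              rw [hshape]; simp [PySem.Chars.startswith, List.isPrefixOf]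
              intro h1 h2 h3; exact hab ⟨h1.symm, h2.symm⟩
            have hn2B : ¬ (cs.drop i).take 2 = ['/', '-'] := by
              rw [hshape]; simp; intro h1 h2; exact hab ⟨h1, h2⟩
            have hn2A : ¬ ((cs.drop i).take 3).take 2 = ['/', '-'] := by
              rw [hshape]; simp; intro h1 h2; exact hab ⟨h1, h2⟩
            have hn3B : ¬ (cs.drop i).take 2 = ['-', '/'] := by
              rw [hshape]; simp; intro h1 h2; exact hab2 ⟨h1, h2⟩
            have hn3A : ¬ ((cs.drop i).take 3).take 2 = ['-', '/'] := by
              rw [hshape]; simp; intro h1 h2; exact hab2 ⟨h1, h2⟩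
            have htop : topBF cs (fuel + 1) i = topBF cs fuel (i + 1) := by
              simp only [topBF]; rw [if_pos h, if_neg hn1B, if_neg hn2B, if_neg hn3B]
            rw [iterDocsLoopA.eq_def, dif_pos h, if_neg hn1A, if_neg hn2A, if_neg hn3A]
            rw [ihT (i + 1) acc (by omega), htop]
      · -- fewer than two characters remain
        have htop : topBF cs (fuel + 1) i = [] := by
          simp only [topBF]; rw [if_neg h]
        rw [loopA_stop cs [] i acc h, htop]
        simp

-- ===== VERDICT (by name: the statement is the Claim_ definition above) =====
theorem iter_docstrings_spec : Claim_equal_iter_docstrings := by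
  intro text _
  unfold Spec_iter_docstrings iter_docstrings iter_docstrings_alt
  exact (loopA_splits text.toList (text.toList.length + 2)).2 0 [] (by omega)
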